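-- pv_equiv track=rewrite | github.com/ejb816/nexonix | draco-dev-journal/tools/gaps/integrate_chapter.py | trim_response
-- ===== SOURCE A (Python) =====
-- def trim_response(response, max_chars=2000):
--     """Trim very long responses to essential content at paragraph boundaries."""
--     if len(response) <= max_chars:
--         return response
--     paragraphs = response.split('\n\n')
--     kept = []
--     char_count = 0
--     for p in paragraphs:
--         if char_count + len(p) > max_chars and kept:
--             break
--         kept.append(p)
--         char_count += len(p) + 2
--     result = '\n\n'.join(kept)
--     if len(result) < len(response) - 100:
--         result += '\n\n[Response continued with additional detail.]'
--     return result
-- ===== SOURCE B (Python) =====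
-- def trim_response(response, max_chars=2000):
--     """Trim very long responses to essential content at paragraph boundaries."""
--     if len(response) <= max_chars:
--         return response
--     n = len(response)
--     # Work directly on the raw string: walk the blank-line separator offsets with
--     # str.find and cut at the end of the last paragraph that fits (the first
--     # paragraph is always kept); never build the paragraph list.
--     first = response.find('\n\n')
--     cut = first if first != -1 else n
--     while cut < n:
--         nxt = response.find('\n\n', cut + 2)
--         end = nxt if nxt != -1 else n
--         if end > max_chars:
--             break
--         cut = end
--     result = response[:cut]
--     if len(result) < n - 100:
--         result += '\n\n[Response continued with additional detail.]'
--     return result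
-- ===== Notes on version B (the rewrite author's own statement) =====
-- stated objective: alternative
-- what changed: Instead of splitting the response into a paragraph list, greedily accumulating kept paragraphs and re-joining them, B works on the raw string: it walks the blank-line separator offsets with str.find, stops at the last paragraph end that fits the budget, and returns a single slice response[:cut]; B can stop scanning at the cut while A always splits the whole string.
import Mathlib
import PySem

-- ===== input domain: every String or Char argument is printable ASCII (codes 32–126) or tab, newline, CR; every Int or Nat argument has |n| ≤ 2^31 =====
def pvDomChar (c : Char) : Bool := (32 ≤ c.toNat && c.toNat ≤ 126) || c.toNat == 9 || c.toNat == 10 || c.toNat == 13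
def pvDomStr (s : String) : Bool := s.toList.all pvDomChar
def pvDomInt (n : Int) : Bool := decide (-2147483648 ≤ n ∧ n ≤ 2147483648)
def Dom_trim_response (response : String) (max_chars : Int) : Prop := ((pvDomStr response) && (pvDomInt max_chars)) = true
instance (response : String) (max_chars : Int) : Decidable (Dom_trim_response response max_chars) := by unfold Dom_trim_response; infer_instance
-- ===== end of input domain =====

-- B replaces A's split-into-paragraphs / greedy-keep / re-join pipeline by a walk
-- over the blank-line separator offsets of the raw string with find, returning one
-- slice response[:cut]; B never builds the paragraph list (objective: alternative).

-- ===== PORT A =====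
-- A's for-loop with break: kept/char_count accumulators, stop at first overflow once kept is nonempty
def trimLoopA (M : Int) : List String → List String → Int → List String
  | [], kept, _ => kept
  | p :: rest, kept, cc =>
    if cc + PySem.Str.len p > M ∧ kept ≠ [] then kept
    else trimLoopA M rest (kept ++ [p]) (cc + PySem.Str.len p + 2)

def trim_response (response : String) (max_chars : Int) : String :=
  if PySem.Str.len response ≤ max_chars then response
  else
    let paragraphs := (PySem.Str.split? response "\n\n").getD []
    let kept := trimLoopA max_chars paragraphs [] 0
    let result := PySem.Str.join "\n\n" kept
    if PySem.Str.len result < PySem.Str.len response - 100 then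
      result ++ "\n\n[Response continued with additional detail.]"
    else result

-- ===== PORT B =====
-- termination fact for B's while loop: a successful find from cut+2 lands beyond cut
theorem pvFindFrom_gt (s sub : String) (cut : Int)
    (h : PySem.Str.findFrom s sub (cut + 2) ≠ -1) :
    cut < PySem.Str.findFrom s sub (cut + 2) := by
  have hle := PySem.Chars.neg_one_le_find (List.drop (if (cut+2) < 0 then (if (cut+2) + (s.toList.length:Int) < 0 then 0 else (cut+2) + (s.toList.length:Int)) else (cut+2)).toNat (List.take ((s.toList.length:Int)).toNat s.toList)) sub.toList
  unfold PySem.Str.findFrom PySem.Chars.findFrom at h ⊢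
  split_ifs at h ⊢ <;> simp_all <;> omega

-- B's while loop: walk the separator offsets; stop at the first paragraph end past the budget
def walkB (s : String) (M n cut : Int) : Int :=
  if cut < n then
    if (if PySem.Str.findFrom s "\n\n" (cut + 2) ≠ -1 then PySem.Str.findFrom s "\n\n" (cut + 2) else n) > M then
      cut
    else
      walkB s M n (if PySem.Str.findFrom s "\n\n" (cut + 2) ≠ -1 then PySem.Str.findFrom s "\n\n" (cut + 2) else n)
  else cut
termination_by (n - cut).toNat
decreasing_by
  split_ifs with hf
  · have := pvFindFrom_gt s "\n\n" cut hf; omega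
  · omega

def trim_response_alt (response : String) (max_chars : Int) : String :=
  if PySem.Str.len response ≤ max_chars then response
  else
    let n := PySem.Str.len response
    let first := PySem.Str.find response "\n\n"
    let cut := walkB response max_chars n (if first ≠ -1 then first else n)
    let result := PySem.Str.slice response none (some cut)
    if PySem.Str.len result < n - 100 then
      result ++ "\n\n[Response continued with additional detail.]"
    else result

-- ===== PRECONDITION & SPEC =====
def Spec_trim_response (response : String) (max_chars : Int) (out : String) : Prop := out = trim_response_alt response max_chars
instance (response : String) (max_chars : Int) (out : String) : Decidable (Spec_trim_response response max_chars out) := by unfold Spec_trim_response; infer_instance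

-- ===== CLAIM (what is proved, stated in full; the proofs are below) =====
def Claim_equal_trim_response : Prop := ∀ (response : String) (max_chars : Int), Dom_trim_response response max_chars → Spec_trim_response response max_chars (trim_response response max_chars)

-- ===== LEMMAS AND PROOFS =====

def pvSep : List Char := ['\n', '\n']

-- the first paragraph boundary, as find sees it
theorem find_facts (cs : List Char) (h : PySem.Chars.find cs pvSep ≠ -1) :
    0 ≤ PySem.Chars.find cs pvSep ∧
    pvSep <+: cs.drop (PySem.Chars.find cs pvSep).toNat ∧
    (PySem.Chars.find cs pvSep).toNat + 2 ≤ cs.length := by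
  have h0 : 0 ≤ PySem.Chars.find cs pvSep := by
    have := PySem.Chars.neg_one_le_find cs pvSep; omega
  have hs := (PySem.Chars.find_spec h0).1
  have hl := hs.length_le
  rw [List.length_drop] at hl
  have h2 : pvSep.length = 2 := rfl
  exact ⟨h0, hs, by omega⟩

-- the canonical chunk decomposition of a string at its '\n\n' separators
def chunks (cs : List Char) : List (List Char) :=
  if h : PySem.Chars.find cs pvSep = -1 then [cs]
  else
    cs.take (PySem.Chars.find cs pvSep).toNat ::
      chunks (cs.drop ((PySem.Chars.find cs pvSep).toNat + 2))
termination_by cs.length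
decreasing_by
  have h2 := (find_facts cs h).2.2
  simp only [List.length_drop]
  omega

theorem chunks_ne_nil (cs : List Char) : chunks cs ≠ [] := by
  rw [chunks]; split <;> simp

theorem chunks_single {cs : List Char} (h : PySem.Chars.find cs pvSep = -1) :
    chunks cs = [cs] := by rw [chunks]; simp [h]

theorem chunks_cons {cs : List Char} (h : PySem.Chars.find cs pvSep ≠ -1) :
    chunks cs = cs.take (PySem.Chars.find cs pvSep).toNat ::
      chunks (cs.drop ((PySem.Chars.find cs pvSep).toNat + 2)) := by
  rw [chunks]; simp [h]

-- splitting cs at position k where a separator sits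
theorem decomp (cs : List Char) (k : Nat) (hp : pvSep <+: cs.drop k) :
    (∀ m : Nat, cs.take (k + 2 + m) = cs.take k ++ pvSep ++ (cs.drop (k + 2)).take m) ∧
    cs = cs.take k ++ pvSep ++ cs.drop (k + 2) := by
  obtain ⟨t, ht⟩ := hp
  have hdd : cs.drop (k + 2) = t := by
    have h1 : cs.drop (k + 2) = (cs.drop k).drop 2 := by rw [List.drop_drop]
    rw [h1, ← ht]
    rfl
  have hsplit : ∀ m : Nat, cs.take (k + (2 + m)) = cs.take k ++ ((cs.drop k).take (2 + m)) :=
    fun m => List.take_add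
  constructor
  · intro m
    have hs2 := hsplit m
    rw [show k + 2 + m = k + (2 + m) by omega] at *
    rw [hs2, ← ht, hdd]
    have h3 : (pvSep ++ t).take (2 + m) = pvSep ++ t.take m := by
      rw [show (2+m) = pvSep.length + m by rfl, List.take_append]
      simp
    rw [h3, List.append_assoc]
  · conv_lhs => rw [← List.take_append_drop k cs]
    rw [← ht, hdd, List.append_assoc]

theorem go_succ (sub : List Char) : ∀ (l : List Char) (k : Nat),
    PySem.Chars.find.go sub l (k + 1) =
      if PySem.Chars.find.go sub l k = -1 then -1 else PySem.Chars.find.go sub l k + 1 := by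
  intro l
  induction l with
  | nil =>
    intro k
    simp only [PySem.Chars.find.go]
    split_ifs <;> simp_all
  | cons c rest ih =>
    intro k
    simp only [PySem.Chars.find.go]
    split_ifs with h1 <;> simp_all

-- find on a cons cell, when no separator starts here
theorem find_cons_of_not_prefix {c : Char} {rest : List Char}
    (h : ¬ pvSep.isPrefixOf (c :: rest)) :
    PySem.Chars.find (c :: rest) pvSep =
      if PySem.Chars.find rest pvSep = -1 then -1 else PySem.Chars.find rest pvSep + 1 := by
  simp only [PySem.Chars.find, PySem.Chars.find.go, if_neg h]
  exact go_succ pvSep rest 0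

theorem find_of_prefix {c : Char} {rest : List Char}
    (h : pvSep.isPrefixOf (c :: rest)) :
    PySem.Chars.find (c :: rest) pvSep = 0 := by
  simp only [PySem.Chars.find, PySem.Chars.find.go, h]
  rfl

-- PySem's splitOn computes exactly the chunk decomposition
def preHd (x : List Char) : List (List Char) → List (List Char)
  | [] => [x]
  | q :: t => (x ++ q) :: t

theorem preHd_nil {qs : List (List Char)} (h : qs ≠ []) : preHd [] qs = qs := by
  cases qs with
  | nil => exact absurd rfl h
  | cons q t => simp [preHd]

theorem splitOn_go_eq : ∀ (fuel : Nat) (cs cur : List Char) (acc : List (List Char)),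
    cs.length < fuel →
    PySem.Chars.splitOn.go pvSep fuel cs cur acc = acc.reverse ++ preHd cur.reverse (chunks cs) := by
  intro fuel
  induction fuel with
  | zero => intro cs cur acc h; omega
  | succ f ih =>
    intro cs cur acc h
    cases cs with
    | nil =>
      simp only [PySem.Chars.splitOn.go]
      rw [chunks_single (by decide)]
      simp [preHd]
    | cons c rest =>
      by_cases hpre : pvSep.isPrefixOf (c :: rest)
      · have hfind : PySem.Chars.find (c :: rest) pvSep = 0 := find_of_prefix hpre
        have h2 : pvSep.length = 2 := rfl
        simp only [PySem.Chars.splitOn.go, hpre, if_pos]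
        rw [ih (List.drop pvSep.length (c :: rest)) [] (cur.reverse :: acc)
              (by simp only [List.length_drop, List.length_cons] at h ⊢; omega)]
        rw [chunks_cons (show PySem.Chars.find (c :: rest) pvSep ≠ -1 by rw [hfind]; decide), hfind]
        rw [show ([] : List Char).reverse = [] from rfl, preHd_nil (chunks_ne_nil _)]
        simp [preHd, h2]
      · simp only [PySem.Chars.splitOn.go, hpre]
        rw [ih rest (c :: cur) acc (by simp only [List.length_cons] at h; omega)]
        have hrev : (c :: cur).reverse = cur.reverse ++ [c] := by simp
        have hfc := find_cons_of_not_prefix hpre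
        by_cases hfr : PySem.Chars.find rest pvSep = -1
        · rw [chunks_single hfr, chunks_single (show PySem.Chars.find (c :: rest) pvSep = -1 by rw [hfc, if_pos hfr]), hrev]
          simp [preHd]
        · have hj : 0 ≤ PySem.Chars.find rest pvSep := by
            have := PySem.Chars.neg_one_le_find rest pvSep; omega
          have hfind : PySem.Chars.find (c :: rest) pvSep = PySem.Chars.find rest pvSep + 1 := by
            rw [hfc, if_neg hfr]
          have htn : (PySem.Chars.find (c :: rest) pvSep).toNat
              = (PySem.Chars.find rest pvSep).toNat + 1 := by rw [hfind]; omega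
          rw [chunks_cons hfr, chunks_cons (show PySem.Chars.find (c :: rest) pvSep ≠ -1 by rw [hfind]; omega), htn, hrev]
          simp [preHd, List.take_succ_cons, List.drop_succ_cons, List.append_assoc]

theorem splitOn_eq_chunks (cs : List Char) :
    PySem.Chars.splitOn cs pvSep = chunks cs := by
  unfold PySem.Chars.splitOn
  rw [splitOn_go_eq (cs.length + 1) cs [] [] (by omega)]
  simp only [List.reverse_nil, List.nil_append]
  rw [preHd_nil (chunks_ne_nil _)]

-- chunk-level budget count (A's greedy loop, after the always-kept first paragraph)
def cutIdx (M : Int) : List (List Char) → Int → Nat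
  | [], _ => 0
  | q :: t, cc => if cc + (q.length : Int) > M then 0 else cutIdx M t (cc + q.length + 2) + 1

-- A's loop keeps the head plus the cutIdx-prefix of the rest
theorem trimLoopA_eq (M : Int) (qs : List (List Char)) :
    ∀ (kept : List String) (cc : Int), kept ≠ [] →
      trimLoopA M (qs.map String.ofList) kept cc =
        kept ++ (qs.take (cutIdx M qs cc)).map String.ofList := by
  induction qs with
  | nil => intro kept cc _; simp [trimLoopA, cutIdx]
  | cons q t ih =>
    intro kept cc hk
    have hlen : PySem.Str.len (String.ofList q) = (q.length : Int) := by
      simp [PySem.Str.len]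
    simp only [List.map_cons, trimLoopA, cutIdx, hlen]
    by_cases hcc : cc + (q.length : Int) > M
    · rw [if_pos ⟨hcc, hk⟩, if_pos hcc]
      simp
    · rw [if_neg (fun hc => hcc hc.1), if_neg hcc,
        ih (kept ++ [String.ofList q]) _ (by simp)]
      simp [List.take_succ_cons]

-- '\n\n'-join with a leading separator when nonempty
def join2 : List (List Char) → List Char
  | [] => []
  | q :: t => pvSep ++ PySem.Chars.join pvSep (q :: t)

theorem join_cons (q : List Char) (qs : List (List Char)) :
    PySem.Chars.join pvSep (q :: qs) = q ++ join2 qs := by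
  cases qs with
  | nil => simp [join2, PySem.Chars.join_singleton]
  | cons r t => rw [PySem.Chars.join_cons_cons, join2]; simp

-- B's walk from the end of a kept paragraph slices exactly what A's loop keeps
theorem join2_cons (q : List Char) (qs : List (List Char)) :
    join2 (q :: qs) = pvSep ++ (q ++ join2 qs) := by
  show pvSep ++ PySem.Chars.join pvSep (q :: qs) = _
  rw [join_cons]

theorem walk_eq (s : String) (M : Int) :
    ∀ (k : Nat), pvSep <+: s.toList.drop k →
      s.toList.take (walkB s M (PySem.Str.len s) (k : Int)).toNat =
        s.toList.take k ++
          join2 ((chunks (s.toList.drop (k + 2))).take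
            (cutIdx M (chunks (s.toList.drop (k + 2))) ((k : Int) + 2))) := by
  suffices H : ∀ (d k : Nat), s.toList.length - k ≤ d → pvSep <+: s.toList.drop k →
      s.toList.take (walkB s M (PySem.Str.len s) (k : Int)).toNat =
        s.toList.take k ++
          join2 ((chunks (s.toList.drop (k + 2))).take
            (cutIdx M (chunks (s.toList.drop (k + 2))) ((k : Int) + 2))) by
    exact fun k hk => H _ k le_rfl hk
  intro d
  induction d with
  | zero =>
    intro k hd hp
    have := hp.length_le
    have h2 : pvSep.length = 2 := rfl
    rw [List.length_drop] at this
    omega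
  | succ d ih =>
    intro k hd hp
    have hll := hp.length_le
    have h2 : pvSep.length = 2 := rfl
    rw [List.length_drop] at hll
    have hcs2 : k + 2 ≤ s.toList.length := by omega
    have hn : PySem.Str.len s = (s.toList.length : Int) := rfl
    have hsep : "\n\n".toList = pvSep := by decide
    have hff : PySem.Str.findFrom s "\n\n" ((k : Int) + 2) =
        if PySem.Chars.find (s.toList.drop (k + 2)) pvSep = -1 then -1
        else ((k + 2 : Nat) : Int) + PySem.Chars.find (s.toList.drop (k + 2)) pvSep := by
      show PySem.Chars.findFrom s.toList ("\n\n".toList) ((k : Int) + 2) = _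
      rw [hsep, show ((k : Int) + 2) = ((k + 2 : Nat) : Int) by push_cast; ring]
      exact PySem.Chars.findFrom_natCast s.toList pvSep (k + 2) hcs2
    rw [walkB, if_pos (by rw [hn]; exact_mod_cast (by omega : k < s.toList.length))]
    by_cases hdf : PySem.Chars.find (s.toList.drop (k + 2)) pvSep = -1
    · -- no further separator: the final chunk runs to the end of the string
      rw [chunks_single hdf]
      rw [hff, if_pos hdf]
      simp only [ne_eq, not_true_eq_false, reduceIte]
      have hdl : ((s.toList.drop (k + 2)).length : Int) = (s.toList.length : Int) - (k + 2) := by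
        rw [List.length_drop]; omega
      by_cases hM : ((k : Int) + 2) + ((s.toList.drop (k + 2)).length : Int) > M
      · rw [if_pos (by rw [hn]; omega : PySem.Str.len s > M)]
        simp only [cutIdx, if_pos hM]
        simp [join2]
      · rw [if_neg (by rw [hn]; omega : ¬ PySem.Str.len s > M)]
        rw [walkB, if_neg (by rw [hn]; omega)]
        simp only [cutIdx, if_neg hM]
        rw [hn, Int.toNat_natCast, List.take_length]
        simp only [List.take_succ_cons, List.take_zero, join2,
          PySem.Chars.join_singleton]
        have h3 := (decomp s.toList k hp).2
        rw [List.append_assoc] at h3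
        exact h3
    · -- a further separator at offset i inside the rest of the string
      obtain ⟨hi0, hip, hil⟩ := find_facts _ hdf
      set i := PySem.Chars.find (s.toList.drop (k + 2)) pvSep with hidef
      rw [chunks_cons hdf]
      rw [hff, if_neg hdf]
      rw [if_pos (by omega : ¬ ((k + 2 : Nat) : Int) + i = -1)]
      have hql : ((s.toList.drop (k + 2)).take i.toNat).length = i.toNat := by
        rw [List.length_take]
        rw [List.length_drop] at hil ⊢
        omega
      have hends : ((k + 2 : Nat) : Int) + i = (((k + 2 + i.toNat : Nat)) : Int) := by
        push_cast; omega
      by_cases hM : ((k + 2 : Nat) : Int) + i > M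
      · rw [if_pos hM]
        rw [cutIdx, if_pos (by rw [hql]; push_cast at hM ⊢; omega)]
        simp [join2]
      · rw [if_neg hM]
        rw [cutIdx, if_neg (by rw [hql]; push_cast at hM ⊢; omega)]
        rw [hends]
        have hdd1 : s.toList.drop (k + 2 + i.toNat) = (s.toList.drop (k + 2)).drop i.toNat := by
          rw [List.drop_drop]
        have hp' : pvSep <+: s.toList.drop (k + 2 + i.toNat) := by rw [hdd1]; exact hip
        rw [List.length_drop] at hil
        rw [ih (k + 2 + i.toNat) (by omega) hp']
        have hdd2 : s.toList.drop (k + 2 + i.toNat + 2) = (s.toList.drop (k + 2)).drop (i.toNat + 2) := by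
          rw [List.drop_drop]; ring_nf
        have htk : s.toList.take (k + 2 + i.toNat) =
            s.toList.take k ++ pvSep ++ (s.toList.drop (k + 2)).take i.toNat :=
          (decomp s.toList k hp).1 i.toNat
        have hcc : ((k + 2 + i.toNat : Nat) : Int) + 2 =
            ((k : Int) + 2) + (((s.toList.drop (k + 2)).take i.toNat).length : Int) + 2 := by
          rw [hql]; push_cast; ring
        rw [hdd2, htk, hcc, List.take_succ_cons, join2_cons]
        simp only [List.append_assoc, ← hidef]

theorem walkB_nonneg (s : String) (M n : Int) : ∀ (cut : Int), 0 ≤ cut → 0 ≤ walkB s M n cut := by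
  intro cut
  induction cut using walkB.induct (s := s) (M := M) (n := n) with
  | case1 x hlt hgt =>
    intro h
    simp only [dite_eq_ite] at hgt
    rwa [walkB, if_pos hlt, if_pos hgt]
  | case2 x hlt hgt ih =>
    intro h
    simp only [dite_eq_ite] at hgt ih
    rw [walkB, if_pos hlt, if_neg hgt]
    apply ih
    split_ifs with hf
    · have := pvFindFrom_gt s "\n\n" x hf; omega
    · omega
  | case3 x hlt => intro h; rwa [walkB, if_neg hlt]

theorem sep_not_empty : pvSep.isEmpty = false := rfl

-- the two ports agree on the long-response branch
theorem results_eq (response : String) (max_chars : Int) :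
    PySem.Str.join "\n\n"
        (trimLoopA max_chars ((PySem.Str.split? response "\n\n").getD []) [] 0) =
      PySem.Str.slice response none
        (some (walkB response max_chars (PySem.Str.len response)
          (if PySem.Str.find response "\n\n" ≠ -1 then PySem.Str.find response "\n\n"
           else PySem.Str.len response))) := by
  have hsep : "\n\n".toList = pvSep := by decide
  have hq : PySem.Str.split? response "\n\n" =
      some ((chunks response.toList).map String.ofList) := by
    unfold PySem.Str.split? PySem.Chars.split?
    rw [hsep, if_neg (by rw [sep_not_empty]; decide), splitOn_eq_chunks]
    rfl
  have hfind : PySem.Str.find response "\n\n" = PySem.Chars.find response.toList pvSep := by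
    show PySem.Chars.find response.toList ("\n\n".toList) = _
    rw [hsep]
  have hn : PySem.Str.len response = (response.toList.length : Int) := rfl
  rw [hq, hfind]
  by_cases hf : PySem.Chars.find response.toList pvSep = -1
  · -- a single paragraph: everything is kept, the slice is the whole string
    rw [chunks_single hf]
    rw [if_neg (by simp [hf])]
    have hkept : trimLoopA max_chars [String.ofList response.toList] [] 0 =
        [String.ofList response.toList] := by
      rw [trimLoopA, if_neg (by simp)]
      simp [trimLoopA]
    simp only [Option.getD_some, List.map_cons, List.map_nil, hkept]
    rw [walkB, if_neg (by omega)]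
    unfold PySem.Str.join PySem.Str.slice
    rw [hsep]
    simp only [List.map_cons, List.map_nil, String.toList_ofList,
      PySem.Chars.join_singleton, PySem.Chars.slice_eq_listSlice, hn,
      PySem.List.slice_to _ (by positivity : (0:Int) ≤ (response.toList.length : Int)),
      Int.toNat_natCast, List.take_length]
  · -- at least two paragraphs: the walk slices exactly what the loop keeps
    obtain ⟨hi0, hip, hil⟩ := find_facts _ hf
    set i := PySem.Chars.find response.toList pvSep with hidef
    rw [chunks_cons hf]
    rw [← hidef]
    rw [if_pos (by omega : ¬ i = -1)]
    have hitn : i = ((i.toNat : Nat) : Int) := by omega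
    have hql : ((response.toList.take i.toNat)).length = i.toNat := by
      rw [List.length_take]; omega
    have hkept : trimLoopA max_chars
        ((response.toList.take i.toNat :: chunks (response.toList.drop (i.toNat + 2))).map String.ofList) [] 0 =
        String.ofList (response.toList.take i.toNat) ::
          ((chunks (response.toList.drop (i.toNat + 2))).take
            (cutIdx max_chars (chunks (response.toList.drop (i.toNat + 2)))
              ((i.toNat : Int) + 2))).map String.ofList := by
      rw [List.map_cons, trimLoopA, if_neg (by simp), List.nil_append,
        trimLoopA_eq max_chars _ [String.ofList (response.toList.take i.toNat)] _ (by simp),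
        show (0 : Int) + PySem.Str.len (String.ofList (response.toList.take i.toNat)) + 2
            = ((i.toNat : Nat) : Int) + 2 by simp [PySem.Str.len, hql]]
      simp
    simp only [Option.getD_some, hkept]
    have hwnn : 0 ≤ walkB response max_chars (PySem.Str.len response) i := by
      rw [hitn]; exact walkB_nonneg response max_chars _ _ (by positivity)
    have hw := walk_eq response max_chars i.toNat hip
    unfold PySem.Str.join PySem.Str.slice
    rw [hsep]
    apply congrArg String.ofList
    rw [PySem.Chars.slice_eq_listSlice, PySem.List.slice_to _ hwnn, hitn, hw]
    simp only [List.map_cons, List.map_map, Function.comp_def, String.toList_ofList,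
      List.map_id']
    rw [join_cons]
    simp only [Int.toNat_natCast]

-- ===== VERDICT (by name: the statement is the Claim_ definition above) =====
theorem trim_response_spec : Claim_equal_trim_response := by
  intro response max_chars _
  unfold Spec_trim_response trim_response trim_response_alt
  by_cases hle : PySem.Str.len response ≤ max_chars
  · rw [if_pos hle, if_pos hle]
  · simp only [if_neg hle]
    rw [results_eq]
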